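-- pv_equiv track=rewrite | github.com/luke-joyce/CSCI-3104-Algorithms | Assignments/PS10/PS10b.py | commonSubstrings
-- ===== SOURCE A (Python) =====
-- def commonSubstrings(x, L, a):
--
-- 	substr=''
-- 	subStrings=[]
-- 	place=0
--
-- 	for inst in a:
-- 		if inst=='/':
-- 			substr=substr+x[place]
-- 		else:
-- 			if len(substr)>=L:
-- 				subStrings.append(substr)
-- 			substr=''
-- 		if inst!='+':
-- 			place=place+1
-- 	if len(substr)>=L:
-- 		subStrings.append(substr)
-- 	return(subStrings)
-- ===== SOURCE B (Python) =====
-- def commonSubstrings(x, L, a):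
--     # Phase 1: one pass over a, recording each flushed segment as a (start_place, length)
--     # run descriptor instead of accumulating characters.
--     runs = []
--     place = 0
--     k = 0
--     for c in a:
--         if c == '/':
--             k += 1
--         else:
--             runs.append((place, k))
--             place += k + (0 if c == '+' else 1)
--             k = 0
--     runs.append((place, k))
--     # Phase 2: materialise only the qualifying segments from x.
--     return [''.join(x[p + t] for t in range(n)) for (p, n) in runs if n >= L]
-- ===== Notes on version B (the rewrite author's own statement) =====
-- stated objective: alternative
-- what changed: B replaces A's per-character substring accumulation with flush-on-delimiter by a two-phase pass: phase 1 records each flushed segment as a (start_place, length) run descriptor, phase 2 filters the runs by length and materialises only the qualifying substrings from x.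
import Mathlib
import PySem

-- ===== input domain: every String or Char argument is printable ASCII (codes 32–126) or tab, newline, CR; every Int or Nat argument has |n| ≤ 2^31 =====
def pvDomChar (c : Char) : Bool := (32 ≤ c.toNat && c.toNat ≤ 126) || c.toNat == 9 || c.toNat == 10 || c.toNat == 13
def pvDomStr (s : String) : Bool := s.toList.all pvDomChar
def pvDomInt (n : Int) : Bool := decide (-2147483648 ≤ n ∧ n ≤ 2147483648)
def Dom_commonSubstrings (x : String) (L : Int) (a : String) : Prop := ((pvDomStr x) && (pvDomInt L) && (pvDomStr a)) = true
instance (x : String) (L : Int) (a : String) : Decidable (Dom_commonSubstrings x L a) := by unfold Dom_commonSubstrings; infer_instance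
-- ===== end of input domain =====

-- B replaces A's per-character substring accumulation by a two-phase pass: first record each
-- flushed segment as a (start_place, length) run descriptor, then materialise only the
-- qualifying segments from x (objective: alternative decomposition, same cost).


-- ===== PORT A =====
-- state: (substr, subStrings, place); x[place] is PySem.Str.pyGet? (none = IndexError, excluded by Pre_)
def stepA (x : String) (L : Int) (s : List Char × List String × Int) (inst : Char) :
    List Char × List String × Int :=
  let s2 :=
    if inst = '/' then
      match PySem.Str.pyGet? x s.2.2 with
      | some c => (s.1 ++ [c], s.2.1, s.2.2)
      | none => (s.1, s.2.1, s.2.2)   -- IndexError in Python; inputs reaching this are outside Pre_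
    else
      (([] : List Char),
       (if L ≤ (s.1.length : Int) then s.2.1 ++ [String.ofList s.1] else s.2.1),
       s.2.2)
  if inst ≠ '+' then (s2.1, s2.2.1, s2.2.2 + 1) else s2

def commonSubstrings (x : String) (L : Int) (a : String) : List String :=
  let st := a.toList.foldl (stepA x L) ([], [], 0)
  if L ≤ (st.1.length : Int) then st.2.1 ++ [String.ofList st.1] else st.2.1

-- ===== PORT B =====
-- phase-1 state: (runs, place, k)
def stepB (s : List (Int × Int) × Int × Int) (c : Char) : List (Int × Int) × Int × Int :=
  if c = '/' then (s.1, s.2.1, s.2.2 + 1)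
  else (s.1 ++ [(s.2.1, s.2.2)], s.2.1 + s.2.2 + (if c = '+' then 0 else 1), 0)

-- ''.join(x[p + t] for t in range(n))
def segB (x : String) (pn : Int × Int) : String :=
  String.ofList ((PySem.List.pyRange 0 pn.2 1).map (fun t => (PySem.Str.pyGet? x (pn.1 + t)).getD ' '))

def commonSubstrings_alt (x : String) (L : Int) (a : String) : List String :=
  let st := a.toList.foldl stepB ([], 0, 0)
  ((st.1 ++ [(st.2.1, st.2.2)]).filter (fun pn => L ≤ pn.2)).map (segB x)

-- ===== PRECONDITION & SPEC =====
-- Pre_ excludes exactly the inputs on which A raises IndexError: some '/' in a is reached with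
-- place = (number of non-'+' characters before it) at or beyond len(x).
def Pre_commonSubstrings (x : String) (L : Int) (a : String) : Prop :=
  ∀ i : Nat, i < a.toList.length → a.toList.getD i ' ' = '/' →
    (a.toList.take i).countP (fun c => c ≠ '+') < x.toList.length
instance (x : String) (L : Int) (a : String) : Decidable (Pre_commonSubstrings x L a) := by
  unfold Pre_commonSubstrings; infer_instance

def pvWitness_commonSubstrings : String × Int × String := ("abcd", 2, "//+//x")

def Spec_commonSubstrings (x : String) (L : Int) (a : String) (out : List String) : Prop := out = commonSubstrings_alt x L a
instance (x : String) (L : Int) (a : String) (out : List String) : Decidable (Spec_commonSubstrings x L a out) := by unfold Spec_commonSubstrings; infer_instance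

-- ===== CLAIM (what is proved, stated in full; the proofs are below) =====
def Claim_equal_commonSubstrings : Prop := ∀ (x : String) (L : Int) (a : String), Dom_commonSubstrings x L a → Pre_commonSubstrings x L a → Spec_commonSubstrings x L a (commonSubstrings x L a)

-- ===== LEMMAS AND PROOFS =====

-- characters of the segment that starts at place p and has length k (list form of segB)
def segChars (x : String) (p k : Int) : List Char :=
  (PySem.List.pyRange 0 k 1).map (fun t => (PySem.Str.pyGet? x (p + t)).getD ' ')

def render (x : String) (L : Int) (runs : List (Int × Int)) : List String :=
  (runs.filter (fun pn => L ≤ pn.2)).map (segB x)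

lemma segChars_len (x : String) (p k : Int) (hk : 0 ≤ k) :
    ((segChars x p k).length : Int) = k := by
  simp [segChars, PySem.List.length_pyRange_one]; omega

lemma segChars_zero (x : String) (p : Int) : segChars x p 0 = [] := by
  simp [segChars]

lemma render_append (x : String) (L : Int) (rs : List (Int × Int)) (p k : Int) :
    render x L (rs ++ [(p, k)]) =
      render x L rs ++ (if L ≤ k then [segB x (p, k)] else []) := by
  simp [render, List.filter_append]
  split_ifs <;> simp_all

lemma main_inv (x : String) (L : Int) :
    ∀ (l : List Char) (p k : Int) (runs : List (Int × Int)) (out : List String),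
      0 ≤ k →
      (∀ i : Nat, i < l.length → l.getD i ' ' = '/' →
        PySem.Str.pyGet? x (p + k + ((l.take i).countP (fun c => c ≠ '+') : Int)) ≠ none) →
      (let st := l.foldl (stepA x L) (segChars x p k, out ++ render x L runs, p + k)
       if L ≤ (st.1.length : Int) then st.2.1 ++ [String.ofList st.1] else st.2.1) =
      out ++ (let st := l.foldl stepB (runs, p, k)
              render x L (st.1 ++ [(st.2.1, st.2.2)])) := by
  intro l
  induction l with
  | nil =>
      intro p k runs out hk _
      simp only [List.foldl_nil, render_append x L runs p k]
      rw [segChars_len x p k hk]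
      split_ifs <;> simp [segB, segChars]
  | cons c rest ih =>
      intro p k runs out hk H
      simp only [List.foldl_cons]
      by_cases hc : c = '/'
      · -- the '/' step: A appends x[place], B extends the run
        have h0 := H 0 (by simp) (by simp [hc])
        obtain ⟨ch, hch⟩ : ∃ ch, PySem.Str.pyGet? x (p + k) = some ch := by
          cases hget : PySem.Str.pyGet? x (p + k) with
          | none => exact absurd (by simpa using hget) (by simpa using h0)
          | some ch => exact ⟨ch, rfl⟩
        have hch' : PySem.List.pyGet? x.toList (p + k) = some ch := by simpa using hch
        have hseg : segChars x p (k + 1) = segChars x p k ++ [ch] := by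
          unfold segChars
          rw [PySem.List.pyRange_one_succ_right hk]
          simp [hch']
        have hstepA : stepA x L (segChars x p k, out ++ render x L runs, p + k) c =
            (segChars x p (k + 1), out ++ render x L runs, p + (k + 1)) := by
          simp [stepA, hc, hch', hseg, Int.add_assoc]
        have hstepB : stepB (runs, p, k) c = (runs, p, k + 1) := by simp [stepB, hc]
        rw [hstepA, hstepB]
        apply ih p (k + 1) runs out (by omega)
        intro i hi hgi
        have h := H (i + 1) (by simpa using hi) (by simpa using hgi)
        have e : List.take (i + 1) (c :: rest) = c :: List.take i rest := rfl
        rw [e, List.countP_cons] at h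
        simp only [hc] at h
        have harg : p + (k + 1) + ((rest.take i).countP (fun c => c ≠ '+') : Int) =
            p + k + (((rest.take i).countP (fun c => c ≠ '+') + 1 : Nat) : Int) := by
          push_cast; ring
        rw [harg]
        simpa using h
      · -- flush step: A appends substr (if long enough) and resets, B closes the run
        have hlen : ((segChars x p k).length : Int) = k := segChars_len x p k hk
        have hout : (if L ≤ ((segChars x p k).length : Int)
              then out ++ (render x L runs ++ [String.ofList (segChars x p k)])
              else out ++ render x L runs) = out ++ render x L (runs ++ [(p, k)]) := by
          rw [hlen, render_append x L runs p k]
          split_ifs <;> simp [segB, segChars]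
        by_cases hp : c = '+'
        · have hstepA : stepA x L (segChars x p k, out ++ render x L runs, p + k) c =
              (segChars x (p + k) 0, out ++ render x L (runs ++ [(p, k)]), p + k) := by
            simp [stepA, hp, segChars_zero, hout]
          have hstepB : stepB (runs, p, k) c = (runs ++ [(p, k)], p + k, 0) := by
            simp [stepB, hp]
          rw [hstepA, hstepB]
          have := ih (p + k) 0 (runs ++ [(p, k)]) out le_rfl ?_
          · simpa using this
          · intro i hi hgi
            have h := H (i + 1) (by simpa using hi) (by simpa using hgi)
            have e : List.take (i + 1) (c :: rest) = c :: List.take i rest := rfl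
            rw [e, List.countP_cons] at h
            simp only [hp] at h
            have harg : p + k + 0 + ((rest.take i).countP (fun c => c ≠ '+') : Int) =
                p + k + (((rest.take i).countP (fun c => c ≠ '+') + 0 : Nat) : Int) := by
              push_cast; ring
            rw [harg]
            simpa using h
        · have hstepA : stepA x L (segChars x p k, out ++ render x L runs, p + k) c =
              (segChars x (p + k + 1) 0, out ++ render x L (runs ++ [(p, k)]), p + k + 1) := by
            simp [stepA, hc, hp, segChars_zero, hout]
          have hstepB : stepB (runs, p, k) c = (runs ++ [(p, k)], p + k + 1, 0) := by
            simp [stepB, hc, hp]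
          rw [hstepA, hstepB]
          have := ih (p + k + 1) 0 (runs ++ [(p, k)]) out le_rfl ?_
          · simpa using this
          · intro i hi hgi
            have h := H (i + 1) (by simpa using hi) (by simpa using hgi)
            have e : List.take (i + 1) (c :: rest) = c :: List.take i rest := rfl
            rw [e, List.countP_cons] at h
            have hp' : (decide (c ≠ '+')) = true := by simp [hp]
            rw [hp'] at h
            have harg : p + k + 1 + 0 + ((rest.take i).countP (fun c => c ≠ '+') : Int) =
                p + k + (((rest.take i).countP (fun c => c ≠ '+') + 1 : Nat) : Int) := by
              push_cast; ring
            rw [harg]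
            simpa using h

-- ===== VERDICT (by name: the statement is the Claim_ definition above) =====
theorem commonSubstrings_spec : Claim_equal_commonSubstrings := by
  intro x L a _ hpre
  unfold Spec_commonSubstrings commonSubstrings commonSubstrings_alt
  have := main_inv x L a.toList 0 0 [] [] le_rfl ?_
  · simpa [segChars_zero, render] using this
  · intro i hi hgi
    have hcount := hpre i hi hgi
    intro hnone
    have hnone' : PySem.List.pyGet? x.toList (0 + 0 + ((a.toList.take i).countP (fun c => c ≠ '+') : Int)) = none := by
      simpa using hnone
    rw [PySem.List.pyGet?_eq_none_iff] at hnone'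
    simp [PySem.Raise.InRange, decide_not] at hnone'
    simp only [decide_not] at hcount
    have hx : x.toList.length = x.length := by simp
    omega
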